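-- pv_equiv track=rewrite | github.com/cleverlzc/lzcgit | autocar.py | get_affected_ids2
-- ===== SOURCE A (Python) =====
-- from typing import List
--
-- def get_affected_ids2(speed: List[int]) -> List[int]:
--     slow_count_list = list()
--     for i in range(len(speed)):
--         now_speed = speed[i]
--         slow_count_list.append([now_speed, 0])
--
--         for j in range(len(slow_count_list)):
--             if slow_count_list[j][0] > now_speed:
--                 slow_count_list[j][1] += 1
--
--     result_list = list()
--     for i in range(len(slow_count_list)):
--         if slow_count_list[i][1] == 0:
--             result_list.append(i)
--     return result_list
-- ===== SOURCE B (Python) =====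
-- from typing import List
--
-- def get_affected_ids2(speed: List[int]) -> List[int]:
--     # One right-to-left pass: keep index i iff speed[i] <= every later speed,
--     # i.e. speed[i] <= running suffix minimum.
--     keep = []
--     m = None
--     for i in range(len(speed) - 1, -1, -1):
--         s = speed[i]
--         if m is None or s <= m:
--             keep.append(i)
--             m = s
--     keep.reverse()
--     return keep
-- ===== Notes on version B (the rewrite author's own statement) =====
-- stated objective: faster
-- what changed: Replaced the quadratic count-of-smaller-later-elements bookkeeping by a single right-to-left pass that tracks the suffix minimum and keeps index i iff speed[i] <= that minimum.
import Mathlib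
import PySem

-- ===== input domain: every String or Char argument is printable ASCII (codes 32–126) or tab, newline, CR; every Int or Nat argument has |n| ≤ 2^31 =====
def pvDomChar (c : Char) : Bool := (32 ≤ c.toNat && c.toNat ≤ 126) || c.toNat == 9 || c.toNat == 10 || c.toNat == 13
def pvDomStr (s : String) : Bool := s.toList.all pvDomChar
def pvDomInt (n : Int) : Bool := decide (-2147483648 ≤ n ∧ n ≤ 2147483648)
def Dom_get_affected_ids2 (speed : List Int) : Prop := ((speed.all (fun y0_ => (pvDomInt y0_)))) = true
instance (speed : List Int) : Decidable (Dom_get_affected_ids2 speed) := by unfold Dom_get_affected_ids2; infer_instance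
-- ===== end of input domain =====

-- B replaces A's quadratic later-smaller-element counting by one right-to-left pass over a suffix minimum (faster, measured).

-- ===== PORT A =====
-- inner loop: append [now,0], then bump the count of every earlier entry whose speed exceeds now
def pvBumpA (now : Int) (scl : List (Int × Int)) : List (Int × Int) :=
  (scl ++ [(now, 0)]).map (fun (p : Int × Int) => if p.1 > now then (p.1, p.2 + 1) else p)

def get_affected_ids2 (speed : List Int) : List Int :=
  (PySem.List.enumerate (speed.foldl (fun scl now => pvBumpA now scl) []) 0).foldl
    (fun res p => if p.2.2 = 0 then res ++ [p.1] else res) []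

-- ===== PORT B =====
-- state: (kept indices so far, suffix minimum so far); fed the (index, value) pairs right-to-left
def pvStepB (st : List Int × Option Int) (p : Int × Int) : List Int × Option Int :=
  match st.2 with
  | none => (st.1 ++ [p.1], some p.2)
  | some m => if p.2 ≤ m then (st.1 ++ [p.1], some p.2) else st

def get_affected_ids2_alt (speed : List Int) : List Int :=
  ((((PySem.List.enumerate speed 0).reverse).foldl pvStepB ([], none)).1).reverse

-- ===== PRECONDITION & SPEC =====
def Spec_get_affected_ids2 (speed : List Int) (out : List Int) : Prop := out = get_affected_ids2_alt speed
instance (speed : List Int) (out : List Int) : Decidable (Spec_get_affected_ids2 speed out) := by unfold Spec_get_affected_ids2; infer_instance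

-- ===== CLAIM (what is proved, stated in full; the proofs are below) =====
def Claim_equal_get_affected_ids2 : Prop := ∀ (speed : List Int), Dom_get_affected_ids2 speed → Spec_get_affected_ids2 speed (get_affected_ids2 speed)

-- ===== LEMMAS AND PROOFS =====

-- count of strictly smaller later elements, as A maintains it
def pvCnt (v : Int) (l : List Int) : Int := ((l.filter (fun x => v > x)).length : Int)

-- A's first loop with an arbitrary accumulator
theorem pvFoldA_init (l : List Int) : ∀ (init : List (Int × Int)),
    l.foldl (fun scl now => pvBumpA now scl) init
      = init.map (fun p => (p.1, p.2 + pvCnt p.1 l))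
        ++ l.foldl (fun scl now => pvBumpA now scl) [] := by
  induction l with
  | nil => intro init; simp [pvCnt]
  | cons a l ih =>
      intro init
      simp only [List.foldl_cons]
      rw [ih (pvBumpA a init), ih (pvBumpA a []), ← List.append_assoc]
      congr 1
      unfold pvBumpA
      simp only [List.map_append, List.map_map, List.nil_append]
      congr 1
      apply List.map_congr_left
      intro p _
      simp only [Function.comp]
      by_cases h : p.1 > a
      · simp [h, pvCnt, add_assoc, add_comm]
      · simp [h, pvCnt]

theorem pvScl_cons (a : Int) (l : List Int) :
    (a :: l).foldl (fun scl now => pvBumpA now scl) []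
      = (a, pvCnt a l) :: l.foldl (fun scl now => pvBumpA now scl) [] := by
  have h0 : pvBumpA a [] = [(a, 0)] := by simp [pvBumpA]
  simp only [List.foldl_cons, h0, pvFoldA_init l [(a, 0)]]
  simp

-- enumerate with a shifted start
theorem pvEnum_shift {α : Type} (xs : List α) : ∀ (s : Int),
    PySem.List.enumerate xs s = (PySem.List.enumerate xs 0).map (fun p => (p.1 + s, p.2)) := by
  induction xs with
  | nil => intro s; simp [PySem.List.enumerate_nil]
  | cons x xs ih =>
      intro s
      rw [PySem.List.enumerate_cons, PySem.List.enumerate_cons, ih (s + 1), ih (0 + 1)]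
      simp only [List.map_cons, List.map_map, zero_add]
      congr 1
      apply List.map_congr_left
      intro p _
      simp only [Function.comp]
      congr 1
      ring

-- A's second loop is a filter+map
theorem pvResA_filter (ps : List (Int × (Int × Int))) (acc : List Int) :
    ps.foldl (fun res p => if p.2.2 = 0 then res ++ [p.1] else res) acc
      = acc ++ (ps.filter (fun p => p.2.2 == 0)).map (·.1) := by
  induction ps generalizing acc with
  | nil => simp
  | cons p ps ih =>
      simp only [List.foldl_cons, List.filter_cons]
      by_cases h : p.2.2 = 0
      · rw [if_pos h, ih]; simp [h]
      · rw [if_neg h, ih]; simp [h]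

-- A on a cons
theorem pvA_cons (a : Int) (l : List Int) :
    get_affected_ids2 (a :: l)
      = (if pvCnt a l = 0 then [0] else []) ++ (get_affected_ids2 l).map (fun i => i + 1) := by
  unfold get_affected_ids2
  rw [pvScl_cons, PySem.List.enumerate_cons, pvEnum_shift _ (0 + 1)]
  rw [pvResA_filter, pvResA_filter, List.filter_cons]
  simp only [List.nil_append, List.filter_map, List.map_map]
  by_cases h : pvCnt a l = 0
  · simp only [h]
    simp [Function.comp_def]
  · rw [if_neg h]
    have hb : (((a, pvCnt a l) : Int × Int).2 == 0) = false := by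
      simp [h]
    simp only [hb]
    simp [Function.comp_def]

-- B's accumulator only grows by appending
theorem pvRunB_acc (ps : List (Int × Int)) : ∀ (acc : List Int) (m : Option Int),
    ps.foldl pvStepB (acc, m)
      = (acc ++ (ps.foldl pvStepB ([], m)).1, (ps.foldl pvStepB ([], m)).2) := by
  induction ps with
  | nil => intro acc m; simp
  | cons p ps ih =>
      intro acc m
      have hstep : pvStepB (acc, m) p
          = (acc ++ (pvStepB ([], m) p).1, (pvStepB ([], m) p).2) := by
        unfold pvStepB
        cases m with
        | none => simp
        | some v =>
            by_cases h : p.2 ≤ v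
            · simp [h]
            · simp [h]
      simp only [List.foldl_cons, hstep]
      rw [ih (acc ++ (pvStepB ([], m) p).1) (pvStepB ([], m) p).2,
          ih (pvStepB ([], m) p).1 (pvStepB ([], m) p).2]
      cases hE : pvStepB ([], m) p with
      | mk A1 m1 => simp [List.append_assoc]

-- shifting all indices by one shifts the kept indices by one
theorem pvRunB_shift (ps : List (Int × Int)) : ∀ (m : Option Int),
    (ps.map (fun p => (p.1 + 1, p.2))).foldl pvStepB ([], m)
      = ((ps.foldl pvStepB ([], m)).1.map (fun i => i + 1), (ps.foldl pvStepB ([], m)).2) := by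
  induction ps with
  | nil => intro m; simp
  | cons p ps ih =>
      intro m
      have hstep : pvStepB ([], m) (p.1 + 1, p.2)
          = ((pvStepB ([], m) p).1.map (fun i => i + 1), (pvStepB ([], m) p).2) := by
        unfold pvStepB
        cases m with
        | none => simp
        | some v =>
            by_cases h : p.2 ≤ v
            · simp [h]
            · simp [h]
      simp only [List.map_cons, List.foldl_cons, hstep]
      rw [pvRunB_acc (ps.map (fun p => (p.1 + 1, p.2)))
            ((pvStepB ([], m) p).1.map (fun i => i + 1)) (pvStepB ([], m) p).2,
          pvRunB_acc ps (pvStepB ([], m) p).1 (pvStepB ([], m) p).2,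
          ih (pvStepB ([], m) p).2]
      simp [List.map_append]

-- the second state component is the running minimum of the values seen
theorem pvRunB_min (ps : List (Int × Int)) : ∀ (acc : List Int) (m : Option Int) (a : Int),
    (match (ps.foldl pvStepB (acc, m)).2 with | none => True | some v => a ≤ v)
      ↔ ((∀ x ∈ ps.map (·.2), a ≤ x) ∧ (∀ u, m = some u → a ≤ u)) := by
  induction ps with
  | nil =>
      intro acc m a
      cases m with
      | none => simp
      | some v => simp
  | cons p ps ih =>
      intro acc m a
      simp only [List.foldl_cons]
      cases m with
      | none =>
          have hstep : pvStepB (acc, none) p = (acc ++ [p.1], some p.2) := by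
            unfold pvStepB; simp
          rw [hstep, ih (acc ++ [p.1]) (some p.2) a]
          simp only [List.map_cons, List.mem_cons]
          constructor
          · rintro ⟨h1, h2⟩
            exact ⟨fun x hx => by rcases hx with rfl | hx; exact h2 p.2 rfl; exact h1 x hx,
                   fun u hu => by cases hu⟩
          · rintro ⟨h1, _⟩
            exact ⟨fun x hx => h1 x (Or.inr hx), fun u hu => by cases hu; exact h1 p.2 (Or.inl rfl)⟩
      | some v =>
          by_cases h : p.2 ≤ v
          · have hstep : pvStepB (acc, some v) p = (acc ++ [p.1], some p.2) := by
              unfold pvStepB; simp [h]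
            rw [hstep, ih (acc ++ [p.1]) (some p.2) a]
            simp only [List.map_cons, List.mem_cons]
            constructor
            · rintro ⟨h1, h2⟩
              have hap : a ≤ p.2 := h2 p.2 rfl
              exact ⟨fun x hx => by rcases hx with rfl | hx; exact hap; exact h1 x hx,
                     fun u hu => by cases hu; exact le_trans hap h⟩
            · rintro ⟨h1, _⟩
              exact ⟨fun x hx => h1 x (Or.inr hx),
                     fun u hu => by cases hu; exact h1 p.2 (Or.inl rfl)⟩
          · have hstep : pvStepB (acc, some v) p = (acc, some v) := by
              unfold pvStepB; simp [h]
            rw [hstep, ih acc (some v) a]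
            simp only [List.map_cons, List.mem_cons]
            constructor
            · rintro ⟨h1, h2⟩
              have hav : a ≤ v := h2 v rfl
              exact ⟨fun x hx => by
                       rcases hx with rfl | hx
                       · exact le_trans hav (le_of_lt (lt_of_not_ge h))
                       · exact h1 x hx,
                     h2⟩
            · rintro ⟨h1, h2⟩
              exact ⟨fun x hx => h1 x (Or.inr hx), h2⟩

-- B on a cons
theorem pvB_cons (a : Int) (l : List Int) :
    get_affected_ids2_alt (a :: l)
      = (if ∀ x ∈ l, a ≤ x then [0] else []) ++ (get_affected_ids2_alt l).map (fun i => i + 1) := by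
  unfold get_affected_ids2_alt
  rw [PySem.List.enumerate_cons, pvEnum_shift l (0 + 1)]
  simp only [List.reverse_cons]
  rw [List.foldl_append, ← List.map_reverse]
  simp only [zero_add]
  rw [pvRunB_shift ((PySem.List.enumerate l 0).reverse) none]
  have hmin := pvRunB_min ((PySem.List.enumerate l 0).reverse) [] none a
  have hvals : ((PySem.List.enumerate l 0).reverse).map (·.2) = l.reverse := by
    rw [List.map_reverse, PySem.List.map_snd_enumerate]
  rw [hvals] at hmin
  simp only [List.mem_reverse] at hmin
  by_cases hC : ∀ x ∈ l, a ≤ x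
  · cases hR2 : ((PySem.List.enumerate l 0).reverse.foldl pvStepB ([], none)).2 with
    | none => rw [if_pos hC]; simp [pvStepB, List.map_reverse]
    | some v =>
        rw [hR2] at hmin
        simp only at hmin
        have hav : a ≤ v := hmin.mpr ⟨hC, by intro u hu; cases hu⟩
        rw [if_pos hC]; simp [pvStepB, hav, List.map_reverse]
  · cases hR2 : ((PySem.List.enumerate l 0).reverse.foldl pvStepB ([], none)).2 with
    | none =>
        exfalso
        rw [hR2] at hmin
        simp only at hmin
        exact hC (hmin.mp trivial).1
    | some v =>
        rw [hR2] at hmin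
        simp only at hmin
        have hav : ¬ a ≤ v := fun h => hC (hmin.mp h).1
        rw [if_neg hC]; simp [pvStepB, hav, List.map_reverse]

theorem pvCnt_zero_iff (a : Int) (l : List Int) : pvCnt a l = 0 ↔ ∀ x ∈ l, a ≤ x := by
  unfold pvCnt
  rw [Int.natCast_eq_zero, List.length_eq_zero_iff, List.filter_eq_nil_iff]
  constructor
  · intro h x hx
    have := h x hx
    simp at this
    omega
  · intro h x hx
    simp
    exact h x hx

-- ===== VERDICT (by name: the statement is the Claim_ definition above) =====
theorem pvMain (speed : List Int) : get_affected_ids2 speed = get_affected_ids2_alt speed := by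
  induction speed with
  | nil => rfl
  | cons a l ih =>
      rw [pvA_cons, pvB_cons, ih]
      by_cases h : ∀ x ∈ l, a ≤ x
      · rw [if_pos ((pvCnt_zero_iff a l).mpr h), if_pos h]
      · rw [if_neg (fun hc => h ((pvCnt_zero_iff a l).mp hc)), if_neg h]

theorem get_affected_ids2_spec : Claim_equal_get_affected_ids2 :=
  fun speed _ => pvMain speed
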